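-- pv_equiv track=rewrite | github.com/r5by/montgomery | mont/common.py | csa
-- ===== SOURCE A (Python) =====
-- REG_SIZE = 256  # the register size in bits
--
-- def csa(x, y, z, _T=REG_SIZE):
--     '''
--         3-2 CSA(Carry-save-adders) for three T-bit integers x, y and z;
--         Generally speaking, csa of three T-bit integers shall produce two (T+1)-bit integers S(sum) and C(carry)
--     :param x:
--     :param y:
--     :param z:
--     :param _T: Max bit length of x,y,z if given, o.w. calc. from x,y,z
--     :return:
-- '''
--
--     # Initialize sum (S) and carry (C)
--     S = 0
--     C = 0
--
--     T = int(_T) if _T else max(x.bit_length(), y.bit_length(), z.bit_length())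
--     # Iterate through each bit position
--     for i in range(T):
--         # Extract the ith bit from x, y, z
--         xb = (x >> i) & 1
--         yb = (y >> i) & 1
--         zb = (z >> i) & 1
--
--         # Sum bit (X XOR Y XOR Z)
--         Sb = xb ^ yb ^ zb
--
--         # Carry bit ((X AND Y) OR (Y AND Z) OR (Z AND X))
--         Cb = (xb & yb) | (yb & zb) | (zb & xb)
--
--         # Set the ith bit in S and C
--         S |= (Sb << i)
--         C |= (Cb << i)
--
--     # C needs to be shifted left by one (to account for carry bit positions)
--     C <<= 1
--
--     return S, C
-- ===== SOURCE B (Python) =====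
-- REG_SIZE = 256
--
-- def csa(x, y, z, _T=REG_SIZE):
--     # Whole-word bitwise carry-save add: one masked expression instead of a per-bit loop.
--     T = int(_T) if _T else max(x.bit_length(), y.bit_length(), z.bit_length())
--     mask = (1 << T) - 1 if T > 0 else 0
--     return (x ^ y ^ z) & mask, (((x & y) | (y & z) | (z & x)) & mask) << 1
-- ===== Notes on version B (the rewrite author's own statement) =====
-- stated objective: faster
-- what changed: A assembles S and C bit by bit in a Python loop over all T bit positions; B computes them with four whole-word bitwise expressions ((x^y^z)&mask and (((x&y)|(y&z)|(z&x))&mask)<<1) and no loop.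
import Mathlib
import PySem

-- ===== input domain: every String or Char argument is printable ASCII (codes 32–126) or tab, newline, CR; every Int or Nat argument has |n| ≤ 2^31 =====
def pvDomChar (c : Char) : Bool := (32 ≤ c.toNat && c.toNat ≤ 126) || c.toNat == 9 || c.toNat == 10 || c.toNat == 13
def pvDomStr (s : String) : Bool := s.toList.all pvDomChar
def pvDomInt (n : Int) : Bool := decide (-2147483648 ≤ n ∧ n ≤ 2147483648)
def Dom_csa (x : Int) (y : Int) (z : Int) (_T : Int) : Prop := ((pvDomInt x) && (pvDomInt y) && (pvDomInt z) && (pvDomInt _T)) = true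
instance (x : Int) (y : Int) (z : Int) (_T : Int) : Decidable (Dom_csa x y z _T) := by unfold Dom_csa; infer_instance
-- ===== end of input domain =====

-- B replaces A's per-bit loop by four whole-word bitwise operations under one mask (equal return value; measurably faster).

-- ===== PORT A =====
-- Python: T = int(_T) if _T else max(x.bit_length(), y.bit_length(), z.bit_length())
def csaT (x : Int) (y : Int) (z : Int) (_T : Int) : Int :=
  if _T ≠ 0 then _T
  else ((max (max (PySem.Int.bitLength x) (PySem.Int.bitLength y)) (PySem.Int.bitLength z) : Nat) : Int)

-- loop body: extract bit i of x, y, z; combine; set bit i of S and C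
def csaStep (x y z : Int) (SC : Int × Int) (i : Int) : Int × Int :=
  let xb := PySem.Int.band (x >>> i.toNat) 1
  let yb := PySem.Int.band (y >>> i.toNat) 1
  let zb := PySem.Int.band (z >>> i.toNat) 1
  let Sb := PySem.Int.bxor (PySem.Int.bxor xb yb) zb
  let Cb := PySem.Int.bor (PySem.Int.bor (PySem.Int.band xb yb) (PySem.Int.band yb zb)) (PySem.Int.band zb xb)
  (PySem.Int.bor SC.1 (Sb <<< i.toNat), PySem.Int.bor SC.2 (Cb <<< i.toNat))

def csa (x : Int) (y : Int) (z : Int) (_T : Int) : Int × Int :=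
  let T := csaT x y z _T
  let p := (PySem.List.pyRange 0 T 1).foldl (csaStep x y z) (0, 0)
  (p.1, p.2 <<< 1)

-- ===== PORT B =====
def csa_alt (x : Int) (y : Int) (z : Int) (_T : Int) : Int × Int :=
  let T := csaT x y z _T
  let mask : Int := if 0 < T then (1 <<< T.toNat) - 1 else 0
  (PySem.Int.band (PySem.Int.bxor (PySem.Int.bxor x y) z) mask,
   (PySem.Int.band (PySem.Int.bor (PySem.Int.bor (PySem.Int.band x y) (PySem.Int.band y z)) (PySem.Int.band z x)) mask) <<< 1)

-- ===== PRECONDITION & SPEC =====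
def Spec_csa (x : Int) (y : Int) (z : Int) (_T : Int) (out : Int × Int) : Prop := out = csa_alt x y z _T
instance (x : Int) (y : Int) (z : Int) (_T : Int) (out : Int × Int) : Decidable (Spec_csa x y z _T out) := by unfold Spec_csa; infer_instance

-- ===== CLAIM (what is proved, stated in full; the proofs are below) =====
def Claim_equal_csa : Prop := ∀ (x : Int) (y : Int) (z : Int) (_T : Int), Dom_csa x y z _T → Spec_csa x y z _T (csa x y z _T)


-- ===== LEMMAS AND PROOFS =====

-- Difference of a number and a sub-mask is bitwise set difference
theorem pv_sub_and_eq_ldiff : ∀ (m n : ℕ), m - (m &&& n) = Nat.ldiff m n := by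
  intro m
  induction m using Nat.strong_induction_on with
  | _ m ih =>
    intro n
    rcases Nat.eq_zero_or_pos m with h0 | hpos
    · subst h0; simp [Nat.ldiff]
    · have ihm := ih (m / 2) (by omega) (n / 2)
      have hA : (m &&& n) / 2 = m / 2 &&& n / 2 := Nat.and_div_two
      have hL : Nat.ldiff m n / 2 = Nat.ldiff (m / 2) (n / 2) := by
        simpa using (Nat.bitwise_div_two_pow (f := fun a b => a && !b) (x := m) (y := n) (n := 1))
      have hm2 : (m &&& n) % 2 = (m.testBit 0 && n.testBit 0).toNat := by
        rw [← Nat.testBit_and]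
        simpa using (Nat.toNat_testBit (m &&& n) 0).symm
      have hl2 : Nat.ldiff m n % 2 = (m.testBit 0 && !n.testBit 0).toNat := by
        rw [← Nat.testBit_ldiff]
        simpa using (Nat.toNat_testBit (Nat.ldiff m n) 0).symm
      have hmm : m % 2 = (m.testBit 0).toNat := by
        simpa using (Nat.toNat_testBit m 0).symm
      have hb : m / 2 &&& n / 2 ≤ m / 2 := Nat.and_le_left
      have e1 : m = 2 * (m / 2) + m % 2 := by omega
      have e2 : (m &&& n) = 2 * ((m &&& n) / 2) + (m &&& n) % 2 := by omega
      have e3 : Nat.ldiff m n = 2 * (Nat.ldiff m n / 2) + Nat.ldiff m n % 2 := by omega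
      rw [hA] at e2; rw [hL] at e3
      cases hx : m.testBit 0 <;> cases hy : n.testBit 0 <;>
        simp only [hx, hy, Bool.false_and, Bool.and_false, Bool.true_and, Bool.and_true,
          Bool.not_true, Bool.not_false, Bool.toNat_false, Bool.toNat_true] at hm2 hl2 hmm <;> omega

-- PySem's Python-exact bitwise ops agree with Mathlib's Int.xor / Int.land / Int.lor
theorem pv_bxor_eq (a b : Int) : PySem.Int.bxor a b = Int.xor a b := by
  rcases a with m | m <;> rcases b with n | n <;>
    simp [PySem.Int.bxor, Int.xor, Int.negSucc_eq] <;> omega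

theorem pv_band_eq (a b : Int) : PySem.Int.band a b = Int.land a b := by
  rcases a with m | m <;> rcases b with n | n <;>
    simp [PySem.Int.band, Int.land, Int.negSucc_eq, pv_sub_and_eq_ldiff] <;> omega

theorem pv_bor_eq (a b : Int) : PySem.Int.bor a b = Int.lor a b := by
  rcases a with m | m <;> rcases b with n | n <;>
    simp [PySem.Int.bor, Int.lor, Int.negSucc_eq, pv_sub_and_eq_ldiff] <;> omega

-- arithmetic right shift reindexes testBit
theorem pv_testBit_shiftRight (a : Int) (i j : ℕ) : (a >>> i).testBit j = a.testBit (i + j) := by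
  rcases a with m | m <;> simp [Int.testBit, HShiftRight.hShiftRight, Int.shiftRight] <;>
    exact Nat.testBit_shiftRight m

theorem pv_land_one (c : Int) : Int.land c 1 = if c.testBit 0 then 1 else 0 := by
  rcases c with m | m
  · show Int.land (Int.ofNat m) (Int.ofNat 1) = _
    rw [Int.land]
    simp only [Int.testBit, Nat.and_one_is_mod, Nat.testBit_zero]
    rcases Nat.mod_two_eq_zero_or_one m with h | h <;> simp [h]
  · show Int.land (Int.negSucc m) (Int.ofNat 1) = _
    rw [Int.land]
    have h1 : Nat.ldiff 1 m = 1 - (1 &&& m) := (pv_sub_and_eq_ldiff 1 m).symm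
    simp only [Int.testBit, h1, Nat.one_and_eq_mod_two, Nat.testBit_zero]
    rcases Nat.mod_two_eq_zero_or_one m with h | h <;> simp [h]

-- (a >> i) & 1 extracts bit i
theorem pv_bit_extract (a : Int) (i : ℕ) :
    PySem.Int.band (a >>> i) 1 = if a.testBit i then 1 else 0 := by
  rw [pv_band_eq, pv_land_one]
  rw [show (a >>> i).testBit 0 = a.testBit i by simpa using pv_testBit_shiftRight a i 0]

-- the low-bits accumulator A's loop builds, one bit per iteration
def pvLow (w : Int) : Nat → Nat
  | 0 => 0
  | n + 1 => pvLow w n ||| ((w.testBit n).toNat <<< n)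

theorem pv_testBit_pvLow (w : Int) (n j : ℕ) :
    (pvLow w n).testBit j = (decide (j < n) && w.testBit j) := by
  induction n with
  | zero => simp [pvLow]
  | succ n ih =>
    simp only [pvLow, Nat.testBit_or, ih, Nat.testBit_shiftLeft, Nat.testBit_bool_toNat]
    by_cases h : j < n
    · simp [h, Nat.lt_succ_of_lt h, show ¬ (j ≥ n) by omega]
    · by_cases h2 : j = n
      · subst h2; simp
      · simp [show ¬ (j < n + 1) by omega, show j - n ≠ 0 by omega]
        omega

-- masking with 2^n - 1 keeps exactly the low n bits, for either sign
theorem pv_land_mask (w : Int) (n : ℕ) :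
    Int.land w (((2 ^ n - 1 : ℕ) : Int)) = ((pvLow w n : ℕ) : Int) := by
  rcases w with m | m
  · show Int.land (Int.ofNat m) (Int.ofNat (2 ^ n - 1)) = _
    rw [Int.land]
    have : m &&& (2 ^ n - 1) = pvLow (Int.ofNat m) n := by
      apply Nat.eq_of_testBit_eq
      intro j
      simp [pv_testBit_pvLow, Int.testBit, Bool.and_comm]
    simpa using congrArg Int.ofNat this
  · show Int.land (Int.negSucc m) (Int.ofNat (2 ^ n - 1)) = _
    rw [Int.land]
    have : Nat.ldiff (2 ^ n - 1) m = pvLow (Int.negSucc m) n := by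
      apply Nat.eq_of_testBit_eq
      intro j
      simp [Nat.testBit_ldiff, pv_testBit_pvLow, Nat.testBit_two_pow_sub_one, Int.testBit]
    simpa using congrArg Int.ofNat this

-- A's loop over range(n) computes exactly the two masked words
theorem pv_loop (x y z : Int) (n : ℕ) :
    (PySem.List.pyRange 0 (n : Int) 1).foldl (csaStep x y z) (0, 0) =
      (((pvLow (Int.xor (Int.xor x y) z) n : ℕ) : Int),
       ((pvLow (Int.lor (Int.lor (Int.land x y) (Int.land y z)) (Int.land z x)) n : ℕ) : Int)) := by
  induction n with
  | zero => simp [PySem.List.pyRange_one_eq_nil, pvLow]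
  | succ n ih =>
    have hc : ((n + 1 : ℕ) : Int) = (n : Int) + 1 := by push_cast; ring
    rw [hc, PySem.List.pyRange_one_succ_right (by positivity), List.foldl_append, ih]
    simp only [List.foldl_cons, List.foldl_nil, csaStep, Int.toNat_natCast]
    rw [pv_bit_extract, pv_bit_extract, pv_bit_extract]
    have hW : (Int.xor (Int.xor x y) z).testBit n = ((x.testBit n ^^ y.testBit n) ^^ z.testBit n) := by
      simp [Int.testBit_lxor]
    have hU : (Int.lor (Int.lor (Int.land x y) (Int.land y z)) (Int.land z x)).testBit n
        = ((x.testBit n && y.testBit n) || (y.testBit n && z.testBit n) || (z.testBit n && x.testBit n)) := by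
      simp [Int.testBit_lor, Int.testBit_land]
    have cast_shl : ∀ (k m : ℕ), ((k : ℤ)) <<< m = ((k <<< m : ℕ) : ℤ) := fun k m => rfl
    have key : ∀ (w : Int) (b : Bool), w.testBit n = b →
        PySem.Int.bor ((pvLow w n : ℕ) : Int) ((if b then (1:Int) else 0) <<< n) = ((pvLow w (n+1) : ℕ) : Int) := by
      intro w b hb
      have h01 : (if b then (1:Int) else 0) = ((b.toNat : ℕ) : Int) := by cases b <;> rfl
      rw [h01, cast_shl, PySem.Int.bor_natCast]
      simp [pvLow, hb]
    have hSb : PySem.Int.bxor (PySem.Int.bxor (if x.testBit n then (1:Int) else 0) (if y.testBit n then (1:Int) else 0)) (if z.testBit n then (1:Int) else 0)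
        = if (Int.xor (Int.xor x y) z).testBit n then (1:Int) else 0 := by
      rw [hW]; cases x.testBit n <;> cases y.testBit n <;> cases z.testBit n <;> decide
    have hCb : PySem.Int.bor (PySem.Int.bor (PySem.Int.band (if x.testBit n then (1:Int) else 0) (if y.testBit n then (1:Int) else 0)) (PySem.Int.band (if y.testBit n then (1:Int) else 0) (if z.testBit n then (1:Int) else 0))) (PySem.Int.band (if z.testBit n then (1:Int) else 0) (if x.testBit n then (1:Int) else 0))
        = if (Int.lor (Int.lor (Int.land x y) (Int.land y z)) (Int.land z x)).testBit n then (1:Int) else 0 := by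
      rw [hU]; cases x.testBit n <;> cases y.testBit n <;> cases z.testBit n <;> decide
    rw [hSb, hCb, key _ _ rfl, key _ _ rfl]

-- ===== VERDICT (by name: the statement is the Claim_ definition above) =====
theorem csa_spec : Claim_equal_csa := by
  intro x y z _T _
  show csa x y z _T = csa_alt x y z _T
  simp only [csa, csa_alt]
  rcases le_or_gt (csaT x y z _T) 0 with h | h
  · rw [PySem.List.pyRange_one_eq_nil h, if_neg (by omega)]
    simp [List.foldl_nil]
  · have hn : ((csaT x y z _T).toNat : Int) = csaT x y z _T := Int.toNat_of_nonneg (by omega)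
    rw [if_pos h]
    have hmask : ((1 <<< (csaT x y z _T).toNat : ℕ) : Int) - 1 = ((2 ^ (csaT x y z _T).toNat - 1 : ℕ) : Int) := by
      have h2 : (1:ℕ) ≤ 2 ^ (csaT x y z _T).toNat := Nat.one_le_two_pow
      rw [Nat.shiftLeft_eq]
      push_cast [h2]
      ring
    rw [hmask]
    conv_lhs => rw [← hn]
    rw [pv_loop]
    rw [pv_bxor_eq, pv_bxor_eq, pv_band_eq, pv_band_eq, pv_band_eq, pv_band_eq, pv_band_eq,
        pv_bor_eq, pv_bor_eq]
    rw [pv_land_mask, pv_land_mask]
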